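-- pv_equiv track=rewrite | github.com/yongrae-jo/binex2rtcm | src/binex2rtcm/io/ntrip_client.py | _uses_chunked_transfer
-- ===== SOURCE A (Python) =====
-- def _uses_chunked_transfer(header: str) -> bool:
--     for line in header.split("\r\n")[1:]:
--         if ":" not in line:
--             continue
--         key, value = line.split(":", 1)
--         if key.strip().lower() == "transfer-encoding" and "chunked" in value.lower():
--             return True
--     return False
-- ===== SOURCE B (Python) =====
-- def _uses_chunked_transfer(header: str) -> bool:
--     table = {}
--     for line in header.split("\r\n")[1:]:
--         if ":" in line:
--             key, value = line.split(":", 1)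
--             table.setdefault(key.strip().lower(), []).append(value)
--     return any("chunked" in v.lower() for v in table.get("transfer-encoding", []))
-- ===== Notes on version B (the rewrite author's own statement) =====
-- stated objective: idiomatic
-- what changed: B first parses the whole header into a dict-of-lists keyed by lowercased header name, then queries that table for the target header, instead of A's single short-circuiting scan that returns inside the loop.
import Mathlib
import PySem

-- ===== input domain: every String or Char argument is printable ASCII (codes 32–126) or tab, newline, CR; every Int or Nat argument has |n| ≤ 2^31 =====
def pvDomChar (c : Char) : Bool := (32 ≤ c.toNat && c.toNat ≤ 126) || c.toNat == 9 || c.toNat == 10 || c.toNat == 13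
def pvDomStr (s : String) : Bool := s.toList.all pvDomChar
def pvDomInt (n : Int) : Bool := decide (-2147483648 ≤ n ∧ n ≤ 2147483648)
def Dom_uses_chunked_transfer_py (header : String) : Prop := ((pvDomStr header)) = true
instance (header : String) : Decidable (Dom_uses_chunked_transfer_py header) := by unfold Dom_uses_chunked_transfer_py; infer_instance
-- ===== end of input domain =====

-- B parses the whole header into a dict-of-lists keyed by the lowercased header name and then
-- queries that table for the target header, instead of A's single short-circuiting scan (idiomatic, same cost).

-- shared transliteration of `key, value = line.split(":", 1)` (key taken with .strip().lower(),
-- which both A's comparison and B's dict key apply)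
def pvKey (line : String) : String :=
  PySem.Str.lower (PySem.Str.strip (((PySem.Str.splitMax? line ":" 1).getD []).getD 0 ""))

def pvVal (line : String) : String :=
  ((PySem.Str.splitMax? line ":" 1).getD []).getD 1 ""

-- ===== PORT A =====
-- A's for-loop with early return, as structural recursion over the line list
def pvALoop (lines : List String) : Bool :=
  match lines with
  | [] => false
  | line :: rest =>
    if PySem.Str.isIn ":" line = false then pvALoop rest
    else if pvKey line == "transfer-encoding"
        && PySem.Str.isIn "chunked" (PySem.Str.lower (pvVal line)) then true
    else pvALoop rest

def uses_chunked_transfer_py (header : String) : Bool :=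
  pvALoop (PySem.List.slice ((PySem.Str.split? header "\r\n").getD []) (some 1) none)

-- ===== PORT B =====
-- B's header-table building step: table.setdefault(key.strip().lower(), []).append(value)
def pvBStep (d : PySem.Dict String (List String)) (line : String) : PySem.Dict String (List String) :=
  if PySem.Str.isIn ":" line = true then
    d.modify (pvKey line) [] (· ++ [pvVal line])
  else d

def uses_chunked_transfer_py_alt (header : String) : Bool :=
  let table := (PySem.List.slice ((PySem.Str.split? header "\r\n").getD []) (some 1) none).foldl
    pvBStep PySem.Dict.empty
  (table.getD "transfer-encoding" []).any (fun v => PySem.Str.isIn "chunked" (PySem.Str.lower v))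

-- ===== PRECONDITION & SPEC =====
def Spec_uses_chunked_transfer_py (header : String) (out : Bool) : Prop := out = uses_chunked_transfer_py_alt header
instance (header : String) (out : Bool) : Decidable (Spec_uses_chunked_transfer_py header out) := by unfold Spec_uses_chunked_transfer_py; infer_instance

-- ===== CLAIM (what is proved, stated in full; the proofs are below) =====
def Claim_equal_uses_chunked_transfer_py : Prop := ∀ (header : String), Dom_uses_chunked_transfer_py header → Spec_uses_chunked_transfer_py header (uses_chunked_transfer_py header)

-- ===== LEMMAS AND PROOFS =====
-- invariant of B's fold: the final query equals the query of the accumulator OR-ed with A's loop result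
theorem pvInvariant (lines : List String) (d : PySem.Dict String (List String)) :
    ((lines.foldl pvBStep d).getD "transfer-encoding" []).any
        (fun v => PySem.Str.isIn "chunked" (PySem.Str.lower v))
      = ((d.getD "transfer-encoding" []).any
          (fun v => PySem.Str.isIn "chunked" (PySem.Str.lower v)) || pvALoop lines) := by
  induction lines generalizing d with
  | nil => simp [pvALoop]
  | cons line rest ih =>
    rw [List.foldl_cons, ih]
    conv_rhs => rw [pvALoop]
    rw [pvBStep]
    by_cases hc : PySem.Str.isIn ":" line = true
    · rw [if_pos hc, if_neg (by rw [hc]; simp), PySem.Dict.getD_modify]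
      by_cases hkey : pvKey line = "transfer-encoding"
      · rw [if_pos hkey.symm]
        rw [List.any_append]
        simp only [List.any_cons, List.any_nil, Bool.or_false]
        have hb : (pvKey line == "transfer-encoding") = true := beq_iff_eq.mpr hkey
        rw [hb, Bool.true_and]
        cases hch : PySem.Str.isIn "chunked" (PySem.Str.lower (pvVal line)) with
        | true => rw [hkey]; simp
        | false => rw [hkey]; simp
      · rw [if_neg (fun h => hkey h.symm)]
        have hb : (pvKey line == "transfer-encoding") = false := beq_eq_false_iff_ne.mpr hkey
        rw [hb, Bool.false_and, if_neg (by simp)]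
    · simp only [Bool.not_eq_true] at hc
      rw [if_pos hc, if_neg (by rw [hc]; simp)]

-- ===== VERDICT (by name: the statement is the Claim_ definition above) =====
theorem uses_chunked_transfer_py_spec : Claim_equal_uses_chunked_transfer_py := by
  intro header _
  unfold Spec_uses_chunked_transfer_py uses_chunked_transfer_py uses_chunked_transfer_py_alt
  rw [pvInvariant]
  simp
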